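-- pv_equiv track=rewrite | github.com/dmiyakawa/atcoder-workspace | abc179/B/main.py | solve
-- ===== SOURCE A (Python) =====
-- def solve(N: int, D: "List[List[int]]"):
--     count = 0
--     for t in (e[0] == e[1] for e in D):
--         if t:
--             count += 1
--             if count == 3:
--                 return True
--         else:
--             count = 0
--     return False
-- ===== SOURCE B (Python) =====
-- def solve(N, D):
--     for i in range(len(D) - 2):
--         if all(D[i + j][0] == D[i + j][1] for j in range(3)):
--             return True
--     return False
-- ===== Notes on version B (the rewrite author's own statement) =====
-- stated objective: alternative
-- what changed: Replaces A's stateful scan that counts consecutive doubles with reset by a stateless sliding-window scan: for each i it re-checks whether the three rows D[i..i+2] are all doubles, returning on the first such window.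
import Mathlib
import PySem

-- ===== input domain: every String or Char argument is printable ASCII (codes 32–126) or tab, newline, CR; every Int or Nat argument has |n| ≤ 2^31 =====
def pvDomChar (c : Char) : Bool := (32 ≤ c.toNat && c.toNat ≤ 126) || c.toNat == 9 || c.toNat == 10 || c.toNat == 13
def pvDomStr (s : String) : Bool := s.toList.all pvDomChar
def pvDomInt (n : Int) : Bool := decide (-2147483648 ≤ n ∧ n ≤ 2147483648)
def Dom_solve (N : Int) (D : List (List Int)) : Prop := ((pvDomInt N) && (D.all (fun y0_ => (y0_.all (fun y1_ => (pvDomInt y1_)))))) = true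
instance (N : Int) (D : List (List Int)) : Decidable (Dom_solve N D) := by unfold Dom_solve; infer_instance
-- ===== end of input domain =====

-- B replaces A's stateful run-length counter with a stateless scan over fixed three-row windows (alternative decomposition, same O(N) cost).

-- row predicate: e[0] == e[1]  (shared by both ports; under Pre_ rows have length ≥ 2 so pyGet? is exact)
def pvRowDbl (e : List Int) : Bool := decide (PySem.List.pyGet? e 0 = PySem.List.pyGet? e 1)

-- ===== PORT A =====
-- count = 0; for t in (e[0]==e[1] for e in D): if t: count += 1; if count == 3: return True; else: count = 0; return False
def solveGo (L : List (List Int)) (count : Int) : Bool :=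
  match L with
  | [] => false
  | e :: rest =>
    if pvRowDbl e then
      if count + 1 = 3 then true else solveGo rest (count + 1)
    else solveGo rest 0

def solve (N : Int) (D : List (List Int)) : Bool := solveGo D 0

-- ===== PORT B =====
-- for i in range(len(D) - 2): if all(D[i+j][0] == D[i+j][1] for j in range(3)): return True; return False
def solve_alt (N : Int) (D : List (List Int)) : Bool :=
  (List.range (D.length - 2)).any (fun i =>
    (List.range 3).all (fun j =>
      match D[i + j]? with
      | some e => pvRowDbl e
      | none => false))

-- ===== PRECONDITION & SPEC =====
-- Pre_ is exactly where Python A returns without raising: either every row has ≥ 2 entries,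
-- or three consecutive doubles occur with all rows up to them having ≥ 2 entries (A returns True early, before any short row).
def Pre_solve (N : Int) (D : List (List Int)) : Prop :=
  (∀ e ∈ D, 2 ≤ e.length) ∨
  (∃ i < D.length, i + 3 ≤ D.length ∧
    (∀ k < i + 3, 2 ≤ (D.getD k []).length) ∧
    (∀ k, i ≤ k → k < i + 3 → pvRowDbl (D.getD k []) = true))
instance (N : Int) (D : List (List Int)) : Decidable (Pre_solve N D) := by unfold Pre_solve; infer_instance
def pvWitness_solve : Int × List (List Int) := (3, [[1, 1], [1, 2], [2, 2]])
def Spec_solve (N : Int) (D : List (List Int)) (out : Bool) : Prop := out = solve_alt N D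
instance (N : Int) (D : List (List Int)) (out : Bool) : Decidable (Spec_solve N D out) := by unfold Spec_solve; infer_instance

-- ===== CLAIM (what is proved, stated in full; the proofs are below) =====
def Claim_equal_solve : Prop := ∀ (N : Int) (D : List (List Int)), Dom_solve N D → Pre_solve N D → Spec_solve N D (solve N D)

-- ===== LEMMAS AND PROOFS =====

-- structural recursion over overlapping windows: reference form both ports are reduced to
def pvWrec : List (List Int) → Bool
  | a :: b :: c :: r => (pvRowDbl a && pvRowDbl b && pvRowDbl c) || pvWrec (b :: c :: r)
  | _ => false

theorem solveGo_char (L : List (List Int)) :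
    solveGo L 0 = pvWrec L ∧
    solveGo L 1 = ((match L with | b :: c :: _ => pvRowDbl b && pvRowDbl c | _ => false) || pvWrec L) ∧
    solveGo L 2 = ((match L with | a :: _ => pvRowDbl a | _ => false) || pvWrec L) := by
  induction L with
  | nil => simp [solveGo, pvWrec]
  | cons a rest ih =>
    obtain ⟨ih0, ih1, ih2⟩ := ih
    refine ⟨?_, ?_, ?_⟩ <;>
    · simp only [solveGo]
      by_cases h : pvRowDbl a = true <;>
        cases rest with
        | nil => simp [h, pvWrec, ih0, ih1, ih2]
        | cons b r =>
          cases r with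
          | nil => simp [h, pvWrec, ih0, ih1, ih2]
          | cons c r' =>
            simp [h, pvWrec, ih0, ih1, ih2] <;>
              cases hb : pvRowDbl b <;> cases hc : pvRowDbl c <;> simp

theorem solve_alt_char (N : Int) (L : List (List Int)) : solve_alt N L = pvWrec L := by
  unfold solve_alt
  induction L with
  | nil => simp [pvWrec]
  | cons a rest ih =>
    cases rest with
    | nil => simp [pvWrec]
    | cons b r =>
      cases r with
      | nil => simp [pvWrec]
      | cons c r' =>
        have hlen : (a :: b :: c :: r').length - 2 = (r'.length + 1) := by simp
        rw [hlen, List.range_succ_eq_map]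
        simp only [List.any_cons, List.any_map]
        have h3 : List.range 3 = [0, 1, 2] := rfl
        rw [pvWrec]
        congr 1
        · simp [h3, Bool.and_assoc]

-- ===== VERDICT (by name: the statement is the Claim_ definition above) =====
theorem solve_spec : Claim_equal_solve := by
  intro N D _ _
  unfold Spec_solve solve
  rw [solve_alt_char, (solveGo_char D).1]
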